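-- pv_equiv track=rewrite | github.com/hyuna333/Solve | 백준/Silver/2579. 계단 오르기/계단 오르기.py | step
-- ===== SOURCE A (Python) =====
-- def step(num, lst):
--     score = [0] * num
--
--     score[0] = lst[0]
--     score[1] = lst[0] + lst[1]
--     score[2] = max(lst[1]+lst[2], lst[0]+lst[2])
--
--     for i in range(3, num):
--         score[i] = max(score[i-3] + lst[i-1] + lst[i], score[i-2] + lst[i])
--
--     return score[num-1]
-- ===== SOURCE B (Python) =====
-- def step(num, lst):
--     # Complementary formulation: the best score is the total of all num stair
--     # scores minus the cheapest total of stairs one may skip. skip[i] = minimum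
--     # total of skipped stairs over the valid ways to stand on stair i.
--     total = sum(lst[:num])
--     skip = [0] * num
--     skip[2] = min(lst[0], lst[1])
--     for i in range(3, num):
--         skip[i] = min(skip[i - 2] + lst[i - 1], skip[i - 3] + lst[i - 2])
--     return total - skip[num - 1]
-- ===== Notes on version B (the rewrite author's own statement) =====
-- stated objective: alternative
-- what changed: Replaces A's max-gain DP over accumulated scores with the complementary formulation: sum all num stair scores once, run a min-cost DP over the totals of skipped stairs, and return total minus the cheapest skip total.
import Mathlib
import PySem

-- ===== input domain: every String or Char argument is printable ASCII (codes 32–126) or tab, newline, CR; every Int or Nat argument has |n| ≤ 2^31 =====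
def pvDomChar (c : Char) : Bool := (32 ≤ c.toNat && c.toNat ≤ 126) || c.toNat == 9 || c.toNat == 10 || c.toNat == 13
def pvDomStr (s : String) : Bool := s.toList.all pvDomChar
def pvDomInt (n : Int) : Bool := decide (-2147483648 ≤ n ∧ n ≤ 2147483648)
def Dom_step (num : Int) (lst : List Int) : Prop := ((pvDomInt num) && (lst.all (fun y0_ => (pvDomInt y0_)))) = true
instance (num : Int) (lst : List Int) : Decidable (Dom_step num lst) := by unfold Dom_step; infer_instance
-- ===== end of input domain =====

-- B replaces A's max-gain DP over accumulated scores with the complementary formulation: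
-- total of the num stair scores minus a min-cost DP over the totals of skipped stairs.

-- xs[i] with default 0: exact under Pre_step, where every index Python reads is in range
def pyAt (xs : List Int) (i : Int) : Int := PySem.List.pyGetD xs i 0

-- ===== PORT A =====
-- A's loop body: score[i] = max(score[i-3] + lst[i-1] + lst[i], score[i-2] + lst[i])
def fA (lst : List Int) (sc : List Int) (i : Int) : List Int :=
  PySem.List.pySetD sc i
    (max (pyAt sc (i - 3) + pyAt lst (i - 1) + pyAt lst i) (pyAt sc (i - 2) + pyAt lst i))

def step (num : Int) (lst : List Int) : Int :=
  let score := List.replicate num.toNat (0 : Int)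
  let score := PySem.List.pySetD score 0 (pyAt lst 0)
  let score := PySem.List.pySetD score 1 (pyAt lst 0 + pyAt lst 1)
  let score := PySem.List.pySetD score 2 (max (pyAt lst 1 + pyAt lst 2) (pyAt lst 0 + pyAt lst 2))
  let score := (PySem.List.pyRange 3 num 1).foldl (fA lst) score
  pyAt score (num - 1)

-- ===== PORT B =====
-- B's loop body: skip[i] = min(skip[i-2] + lst[i-1], skip[i-3] + lst[i-2])
def fB (lst : List Int) (sk : List Int) (i : Int) : List Int :=
  PySem.List.pySetD sk i
    (min (pyAt sk (i - 2) + pyAt lst (i - 1)) (pyAt sk (i - 3) + pyAt lst (i - 2)))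

def step_alt (num : Int) (lst : List Int) : Int :=
  let total := (PySem.List.slice lst none (some num)).sum
  let skip := List.replicate num.toNat (0 : Int)
  let skip := PySem.List.pySetD skip 2 (min (pyAt lst 0) (pyAt lst 1))
  let skip := (PySem.List.pyRange 3 num 1).foldl (fB lst) skip
  total - pyAt skip (num - 1)

-- ===== PRECONDITION & SPEC =====
-- exactly the inputs on which the Python A returns: it raises IndexError unless 3 ≤ num ≤ len(lst)
def Pre_step (num : Int) (lst : List Int) : Prop := 3 ≤ num ∧ num ≤ (lst.length : Int)
instance (num : Int) (lst : List Int) : Decidable (Pre_step num lst) := by unfold Pre_step; infer_instance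
def pvWitness_step : Int × List Int := (4, [1, 2, 3, 4])

def Spec_step (num : Int) (lst : List Int) (out : Int) : Prop := out = step_alt num lst
instance (num : Int) (lst : List Int) (out : Int) : Decidable (Spec_step num lst out) := by unfold Spec_step; infer_instance

-- ===== CLAIM (what is proved, stated in full; the proofs are below) =====
def Claim_equal_step : Prop := ∀ (num : Int) (lst : List Int), Dom_step num lst → Pre_step num lst → Spec_step num lst (step num lst)

-- ===== LEMMAS AND PROOFS =====

-- A's score[i], as a recurrence (proof-side reference value)
def sRef (lst : List Int) : Nat → Int
  | 0 => pyAt lst 0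
  | 1 => pyAt lst 0 + pyAt lst 1
  | 2 => max (pyAt lst 1 + pyAt lst 2) (pyAt lst 0 + pyAt lst 2)
  | (n + 3) => max (sRef lst n + pyAt lst ((n : Int) + 2) + pyAt lst ((n : Int) + 3))
               (sRef lst (n + 1) + pyAt lst ((n : Int) + 3))

-- B's skip[i], as a recurrence
def kRef (lst : List Int) : Nat → Int
  | 0 => 0
  | 1 => 0
  | 2 => min (pyAt lst 0) (pyAt lst 1)
  | (n + 3) => min (kRef lst (n + 1) + pyAt lst ((n : Int) + 2))
               (kRef lst n + pyAt lst ((n : Int) + 1))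

-- prefix sums of the stair scores
def pS (lst : List Int) : Nat → Int
  | 0 => pyAt lst 0
  | (n + 1) => pS lst n + pyAt lst ((n : Int) + 1)

theorem A_inv (lst : List Int) (num : Int) (sc0 : List Int)
    (hlen0 : sc0.length = num.toNat)
    (h0 : ∀ j : Nat, j < 3 → pyAt sc0 (j : Int) = sRef lst j) :
    ∀ n : Nat, (3 + (n : Int)) ≤ num →
      ((PySem.List.pyRange 3 (3 + (n : Int)) 1).foldl (fA lst) sc0).length = num.toNat ∧
      (∀ j : Nat, j < 3 + n →
        pyAt ((PySem.List.pyRange 3 (3 + (n : Int)) 1).foldl (fA lst) sc0) (j : Int) = sRef lst j) := by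
  intro n
  induction n with
  | zero =>
    intro _
    simp only [Nat.cast_zero, add_zero]
    rw [PySem.List.pyRange_one_eq_nil (le_refl 3)]
    simp only [List.foldl_nil]
    exact ⟨hlen0, fun j hj => h0 j (by omega)⟩
  | succ n ih =>
    intro hb
    have hb' : (3 + (n : Int)) ≤ num := by push_cast at hb ⊢; omega
    obtain ⟨ihlen, ihval⟩ := ih hb'
    have hsplit : PySem.List.pyRange 3 (3 + ((n + 1 : Nat) : Int)) 1
        = PySem.List.pyRange 3 (3 + (n : Int)) 1 ++ [3 + (n : Int)] := by
      push_cast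
      rw [show (3 : Int) + ((n : Int) + 1) = (3 + (n : Int)) + 1 by ring]
      exact PySem.List.pyRange_one_succ_right (by omega)
    rw [hsplit, List.foldl_append]
    set scn := (PySem.List.pyRange 3 (3 + (n : Int)) 1).foldl (fA lst) sc0 with hscn
    have hnum : (3 : Nat) + n < num.toNat := by omega
    have hset : fA lst scn (3 + (n : Int)) = scn.set (3 + n) (sRef lst (n + 3)) := by
      show PySem.List.pySetD scn (3 + (n : Int)) _ = _
      have e3 : (3 + (n : Int)) - 3 = ((n : Nat) : Int) := by ring
      have e2 : (3 + (n : Int)) - 1 = (((n + 2 : Nat)) : Int) := by push_cast; ring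
      have e1 : (3 + (n : Int)) - 2 = (((n + 1 : Nat)) : Int) := by push_cast; ring
      have hv3 : pyAt scn ((n : Nat) : Int) = sRef lst n := ihval n (by omega)
      have hv1 : pyAt scn (((n + 1 : Nat)) : Int) = sRef lst (n + 1) := ihval (n + 1) (by omega)
      rw [e3, e2, e1, hv3, hv1, PySem.List.pySetD_of_nonneg scn _ (by omega)]
      have htn : ((3 : Int) + (n : Int)).toNat = 3 + n := by omega
      rw [htn]
      congr 1
      simp only [sRef]
      rw [show (((n + 2 : Nat)) : Int) = (n : Int) + 2 by push_cast; ring,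
        show (3 : Int) + (n : Int) = (n : Int) + 3 by ring]
    simp only [List.foldl_cons, List.foldl_nil]
    rw [hset]
    refine ⟨by simp only [List.length_set]; exact ihlen, ?_⟩
    intro j hj
    unfold pyAt
    rw [PySem.List.pyGetD_natCast]
    have hls : (scn.set (3 + n) (sRef lst (n + 3))).length = scn.length := List.length_set
    rcases Nat.lt_or_ge j (3 + n) with hlt | hge
    · have h1 : j < (scn.set (3 + n) (sRef lst (n + 3))).length := by omega
      have h2 : j < scn.length := by omega
      rw [List.getD_eq_getElem _ _ h1, List.getElem_set_ne (by omega) h1]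
      have hv := ihval j hlt
      unfold pyAt at hv
      rw [PySem.List.pyGetD_natCast, List.getD_eq_getElem _ _ h2] at hv
      exact hv
    · have hj3 : j = 3 + n := by omega
      subst hj3
      have h1 : 3 + n < (scn.set (3 + n) (sRef lst (n + 3))).length := by omega
      rw [List.getD_eq_getElem _ _ h1, List.getElem_set_self h1, Nat.add_comm 3 n]

theorem B_inv (lst : List Int) (num : Int) (sk0 : List Int)
    (hlen0 : sk0.length = num.toNat)
    (h0 : ∀ j : Nat, j < 3 → pyAt sk0 (j : Int) = kRef lst j) :
    ∀ n : Nat, (3 + (n : Int)) ≤ num →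
      ((PySem.List.pyRange 3 (3 + (n : Int)) 1).foldl (fB lst) sk0).length = num.toNat ∧
      (∀ j : Nat, j < 3 + n →
        pyAt ((PySem.List.pyRange 3 (3 + (n : Int)) 1).foldl (fB lst) sk0) (j : Int) = kRef lst j) := by
  intro n
  induction n with
  | zero =>
    intro _
    simp only [Nat.cast_zero, add_zero]
    rw [PySem.List.pyRange_one_eq_nil (le_refl 3)]
    simp only [List.foldl_nil]
    exact ⟨hlen0, fun j hj => h0 j (by omega)⟩
  | succ n ih =>
    intro hb
    have hb' : (3 + (n : Int)) ≤ num := by push_cast at hb ⊢; omega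
    obtain ⟨ihlen, ihval⟩ := ih hb'
    have hsplit : PySem.List.pyRange 3 (3 + ((n + 1 : Nat) : Int)) 1
        = PySem.List.pyRange 3 (3 + (n : Int)) 1 ++ [3 + (n : Int)] := by
      push_cast
      rw [show (3 : Int) + ((n : Int) + 1) = (3 + (n : Int)) + 1 by ring]
      exact PySem.List.pyRange_one_succ_right (by omega)
    rw [hsplit, List.foldl_append]
    set skn := (PySem.List.pyRange 3 (3 + (n : Int)) 1).foldl (fB lst) sk0 with hskn
    have hnum : (3 : Nat) + n < num.toNat := by omega
    have hset : fB lst skn (3 + (n : Int)) = skn.set (3 + n) (kRef lst (n + 3)) := by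
      show PySem.List.pySetD skn (3 + (n : Int)) _ = _
      have e3 : (3 + (n : Int)) - 3 = ((n : Nat) : Int) := by omega
      have e2 : (3 + (n : Int)) - 1 = (((n + 2 : Nat)) : Int) := by push_cast; ring
      have e1 : (3 + (n : Int)) - 2 = (((n + 1 : Nat)) : Int) := by push_cast; ring
      have hv3 : pyAt skn ((n : Nat) : Int) = kRef lst n := ihval n (by omega)
      have hv1 : pyAt skn (((n + 1 : Nat)) : Int) = kRef lst (n + 1) := ihval (n + 1) (by omega)
      rw [e3, e2, e1, hv3, hv1, PySem.List.pySetD_of_nonneg skn _ (by omega)]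
      have htn : ((3 : Int) + (n : Int)).toNat = 3 + n := by omega
      rw [htn]
      congr 1
    simp only [List.foldl_cons, List.foldl_nil]
    rw [hset]
    refine ⟨by simp only [List.length_set]; exact ihlen, ?_⟩
    intro j hj
    unfold pyAt
    rw [PySem.List.pyGetD_natCast]
    have hls : (skn.set (3 + n) (kRef lst (n + 3))).length = skn.length := List.length_set
    rcases Nat.lt_or_ge j (3 + n) with hlt | hge
    · have h1 : j < (skn.set (3 + n) (kRef lst (n + 3))).length := by omega
      have h2 : j < skn.length := by omega
      rw [List.getD_eq_getElem _ _ h1, List.getElem_set_ne (by omega) h1]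
      have hv := ihval j hlt
      unfold pyAt at hv
      rw [PySem.List.pyGetD_natCast, List.getD_eq_getElem _ _ h2] at hv
      exact hv
    · have hj3 : j = 3 + n := by omega
      subst hj3
      have h1 : 3 + n < (skn.set (3 + n) (kRef lst (n + 3))).length := by omega
      rw [List.getD_eq_getElem _ _ h1, List.getElem_set_self h1, Nat.add_comm 3 n]

-- sum of the first n+1 stair scores equals pS n
theorem sum_take (lst : List Int) :
    ∀ n : Nat, (n : Int) < (lst.length : Int) → (lst.take (n + 1)).sum = pS lst n := by
  intro n
  induction n with
  | zero =>
    intro h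
    have h0 : 0 < lst.length := by omega
    rw [List.take_add_one]
    simp only [List.take_zero, List.nil_append, pS]
    unfold pyAt
    rw [PySem.List.pyGetD_zero, List.getD_eq_getElem _ _ h0, List.getElem?_eq_getElem h0]
    simp
  | succ n ih =>
    intro h
    have hn : (n : Int) < (lst.length : Int) := by push_cast at h ⊢; omega
    have hn1 : n + 1 < lst.length := by omega
    rw [List.take_add_one, List.sum_append, ih hn]
    simp only [pS]
    congr 1
    unfold pyAt
    rw [show ((n : Int) + 1) = (((n + 1 : Nat)) : Int) by push_cast; ring, PySem.List.pyGetD_natCast,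
      List.getD_eq_getElem _ _ hn1, List.getElem?_eq_getElem hn1]
    simp

-- the complement identity: max-gain + min-skip = prefix total
theorem gain_skip (lst : List Int) :
    ∀ n : Nat, sRef lst n + kRef lst n = pS lst n := by
  intro n
  induction n using Nat.strong_induction_on with
  | _ n ih =>
    match n with
    | 0 => simp [sRef, kRef, pS]
    | 1 => simp [sRef, kRef, pS]
    | 2 =>
      simp only [sRef, kRef, pS]
      push_cast
      ring_nf
      omega
    | (k + 3) =>
      have h0 := ih k (by omega)
      have h1 := ih (k + 1) (by omega)
      simp only [sRef, kRef, pS]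
      simp only [pS] at h1
      push_cast at h1 ⊢
      ring_nf
      ring_nf at h0 h1
      omega

-- ===== VERDICT (by name: the statement is the Claim_ definition above) =====
theorem step_spec : Claim_equal_step := by
  intro num lst _ hpre
  obtain ⟨h3, hlen⟩ := hpre
  simp only [Spec_step, step, step_alt]
  obtain ⟨m, hm⟩ : ∃ m : Nat, num = 3 + (m : Int) := ⟨(num - 3).toNat, by omega⟩
  subst hm
  have htN : ((3 : Int) + (m : Int)).toNat = 3 + m := by omega
  -- A's side equals sRef (m+2)
  obtain ⟨sc0rest, hsc0⟩ : ∃ r, List.replicate ((3:Int) + (m:Int)).toNat (0:Int) = 0 :: 0 :: 0 :: r := by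
    refine ⟨List.replicate m 0, ?_⟩
    rw [htN]
    simp [List.replicate_succ, show 3 + m = (m + 2) + 1 by ring, show m + 2 = (m + 1) + 1 by ring]
  rw [hsc0]
  rw [PySem.List.pySetD_of_nonneg _ _ (by norm_num : (0:Int) ≤ 0)]
  rw [PySem.List.pySetD_of_nonneg _ _ (by norm_num : (0:Int) ≤ 1)]
  rw [PySem.List.pySetD_of_nonneg _ _ (by norm_num : (0:Int) ≤ 2)]
  show pyAt ((PySem.List.pyRange 3 (3 + (m:Int)) 1).foldl (fA lst)
      (pyAt lst 0 :: (pyAt lst 0 + pyAt lst 1)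
        :: max (pyAt lst 1 + pyAt lst 2) (pyAt lst 0 + pyAt lst 2) :: sc0rest)) (3 + (m:Int) - 1) = _
  set sc0 := pyAt lst 0 :: (pyAt lst 0 + pyAt lst 1)
      :: max (pyAt lst 1 + pyAt lst 2) (pyAt lst 0 + pyAt lst 2) :: sc0rest with hsc0def
  have hlen0 : sc0.length = ((3:Int) + (m:Int)).toNat := by
    have hr := congrArg List.length hsc0
    simp only [List.length_replicate, List.length_cons] at hr
    simp only [hsc0def, List.length_cons]
    omega
  have h0 : ∀ j : Nat, j < 3 → pyAt sc0 (j : Int) = sRef lst j := by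
    intro j hj
    interval_cases j <;> simp [pyAt, hsc0def, sRef, pysem]
  obtain ⟨_, hval⟩ := A_inv lst (3 + (m:Int)) sc0 hlen0 h0 m (by omega)
  have heA : (3 : Int) + (m : Int) - 1 = (((m + 2 : Nat)) : Int) := by push_cast; ring
  rw [heA, hval (m + 2) (by omega)]
  -- B's side: total, skip list, final lookup
  have htot : (PySem.List.slice lst none (some (3 + (m:Int)))).sum = pS lst (m + 2) := by
    rw [PySem.List.slice_to _ (by omega), htN,
      show 3 + m = (m + 2) + 1 by ring]
    exact sum_take lst (m + 2) (by push_cast; omega)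
  rw [htot]
  rw [PySem.List.pySetD_of_nonneg _ _ (by norm_num : (0:Int) ≤ 2)]
  show _ = pS lst (m + 2) - pyAt ((PySem.List.pyRange 3 (3 + (m:Int)) 1).foldl (fB lst)
      (0 :: 0 :: min (pyAt lst 0) (pyAt lst 1) :: sc0rest)) (((m + 2 : Nat)) : Int)
  set sk0 := (0 : Int) :: 0 :: min (pyAt lst 0) (pyAt lst 1) :: sc0rest with hsk0def
  have hlen0' : sk0.length = ((3:Int) + (m:Int)).toNat := by
    have hr := congrArg List.length hsc0
    simp only [List.length_replicate, List.length_cons] at hr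
    simp only [hsk0def, List.length_cons]
    omega
  have h0' : ∀ j : Nat, j < 3 → pyAt sk0 (j : Int) = kRef lst j := by
    intro j hj
    interval_cases j <;> simp [pyAt, hsk0def, kRef, pysem]
  obtain ⟨_, hvalB⟩ := B_inv lst (3 + (m:Int)) sk0 hlen0' h0' m (by omega)
  rw [hvalB (m + 2) (by omega)]
  have := gain_skip lst (m + 2)
  omega
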